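-- pv_equiv track=rewrite | github.com/botlate/Court-Filings-Preprocessing-for-RAG | code/30_toc_chunker.py | annotate_page_text
-- ===== SOURCE A (Python) =====
-- from typing import List, Dict, Optional, Tuple
--
-- def annotate_page_text(page_text: str, injections: List[Tuple[int, str]]) -> str:
--     if not injections:
--         return page_text
--     lines = page_text.splitlines(keepends=True)
--     starts=[]; pos=0
--     for ln in lines:
--         starts.append(pos); pos+=len(ln)
--     def line_index_at(rel:int)->int:
--         lo,hi=0,len(starts)-1
--         if rel<=0: return 0
--         while lo<=hi:
--             mid=(lo+hi)//2
--             if starts[mid]<=rel: lo=mid+1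
--             else: hi=mid-1
--         return max(0, lo-1)
--     for rel,suffix in sorted(injections, key=lambda x:x[0], reverse=True):
--         li=line_index_at(rel)
--         ln=lines[li]
--         if ln.endswith("\r\n"): core,nl=ln[:-2],"\r\n"
--         elif ln.endswith("\n"): core,nl=ln[:-1],"\n"
--         else: core,nl=ln,""
--         if suffix and suffix not in core:
--             lines[li]=core+" "+suffix+nl
--     return "".join(lines)
-- ===== SOURCE B (Python) =====
-- from typing import List, Tuple
--
-- def annotate_page_text(page_text: str, injections: List[Tuple[int, str]]) -> str:
--     if not injections:
--         return page_text
--     lines = page_text.splitlines(keepends=True)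
--
--     def li_of(rel: int) -> int:
--         if rel <= 0:
--             return 0
--         cnt, acc = 0, 0
--         for ln in lines:
--             if acc <= rel:
--                 cnt += 1
--             acc += len(ln)
--         return cnt - 1
--
--     pairs = [(li_of(rel), suffix)
--              for rel, suffix in sorted(injections, key=lambda x: x[0], reverse=True)]
--     out = []
--     for i, ln in enumerate(lines):
--         for li, suffix in pairs:
--             if li == i:
--                 if ln.endswith("\r\n"):
--                     core, nl = ln[:-2], "\r\n"
--                 elif ln.endswith("\n"):
--                     core, nl = ln[:-1], "\n"
--                 else:
--                     core, nl = ln, ""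
--                 if suffix and suffix not in core:
--                     ln = core + " " + suffix + nl
--         out.append(ln)
--     return "".join(out)
-- ===== Notes on version B (the rewrite author's own statement) =====
-- stated objective: alternative
-- what changed: B replaces A's per-injection binary search and in-place list mutation with a different decomposition: it precomputes each injection's target line index by counting line starts at or below the offset, then makes one pass over the lines applying each line's own injections (in the same descending-offset order) to a local accumulator.
-- crash fix: On empty page_text with a non-empty injections list A raises IndexError (lines[0] on an empty list); B returns the empty string unchanged. — e.g. on annotate_page_text("", [(0, "x")]): A raises IndexError, B returns ""
import Mathlib
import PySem

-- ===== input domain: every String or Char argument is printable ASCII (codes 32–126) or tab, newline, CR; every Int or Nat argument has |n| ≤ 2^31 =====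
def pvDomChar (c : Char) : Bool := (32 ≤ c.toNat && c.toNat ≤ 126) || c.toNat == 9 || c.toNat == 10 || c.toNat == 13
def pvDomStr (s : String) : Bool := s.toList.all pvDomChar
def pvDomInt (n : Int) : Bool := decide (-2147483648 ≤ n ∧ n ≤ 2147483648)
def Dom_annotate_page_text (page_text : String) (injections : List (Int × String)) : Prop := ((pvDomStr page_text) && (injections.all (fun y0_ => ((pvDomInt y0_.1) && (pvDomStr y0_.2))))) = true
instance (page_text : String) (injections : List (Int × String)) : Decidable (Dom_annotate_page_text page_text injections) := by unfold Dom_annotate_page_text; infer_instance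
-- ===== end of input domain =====

-- B re-implements A by grouping injections per line and making one pass over the lines
-- (no binary search, no in-place list mutation); same return value everywhere A returns.

-- ===== PORT A =====

-- str.splitlines(keepends=True), hand-ported (PySem has only the keepends=False form);
-- exact on Dom's character set, where the only line breaks are '\n', '\r', '\r\n'.
def pvSplitKeep : List Char → List Char → List (List Char)
  | [], acc => if acc = [] then [] else [acc.reverse]
  | '\n' :: rest, acc => (acc.reverse ++ ['\n']) :: pvSplitKeep rest []
  | '\r' :: '\n' :: rest, acc => (acc.reverse ++ ['\r', '\n']) :: pvSplitKeep rest []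
  | '\r' :: rest, acc => (acc.reverse ++ ['\r']) :: pvSplitKeep rest []
  | c :: rest, acc => pvSplitKeep rest (c :: acc)

-- the shared per-line body of both Pythons: strip the trailing newline, append " "+suffix
-- when suffix is truthy and not already a substring of the core (a no-op assignment otherwise)
def pvApplySuffix (ln : List Char) (suf : List Char) : List Char :=
  let cn : List Char × List Char :=
    if PySem.Chars.endswith ln ['\r', '\n'] then (PySem.Chars.slice ln none (some (-2)), ['\r', '\n'])
    else if PySem.Chars.endswith ln ['\n'] then (PySem.Chars.slice ln none (some (-1)), ['\n'])
    else (ln, [])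
  if suf ≠ [] ∧ PySem.Chars.isIn suf cn.1 = false then cn.1 ++ ' ' :: suf ++ cn.2 else ln

-- A's inner while-loop binary search, literally (starts[mid] read is always in range when
-- 0 ≤ lo ≤ hi < len, as in A; the getD 0 default is never used on admitted inputs)
def pvBsLoop (starts : List Int) (rel lo hi : Int) : Int :=
  if _h : lo ≤ hi then
    let mid := PySem.Int.floordiv (lo + hi) 2
    if ((PySem.List.pyGet? starts mid).getD 0) ≤ rel then pvBsLoop starts rel (mid + 1) hi
    else pvBsLoop starts rel lo (mid - 1)
  else lo
termination_by (hi + 1 - lo).toNat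
decreasing_by
  all_goals
    have := PySem.Int.floordiv_two_mid_bounds _h
    omega

def pvLineIndexAt (starts : List Int) (rel : Int) : Int :=
  if rel ≤ 0 then 0
  else max 0 (pvBsLoop starts rel 0 ((starts.length : Int) - 1) - 1)

def annotate_page_text (page_text : String) (injections : List (Int × String)) : String :=
  if injections = [] then page_text else
  let lines0 : List (List Char) := pvSplitKeep page_text.toList []
  let starts : List Int :=
    (lines0.foldl (fun (st : List Int × Int) ln => (st.1 ++ [st.2], st.2 + (ln.length : Int))) ([], 0)).1
  let final := (PySem.List.sorted injections (fun x => x.1) true).foldl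
    (fun (ls : List (List Char)) p =>
      let li := pvLineIndexAt starts p.1
      match PySem.List.pyGet? ls li with
      | none => ls          -- unreachable under Pre_: Python raises IndexError here
      | some ln => ls.set li.toNat (pvApplySuffix ln p.2.toList)) lines0
  String.ofList (PySem.Chars.join [] final)

-- ===== PORT B =====
def annotate_page_text_alt (page_text : String) (injections : List (Int × String)) : String :=
  if injections = [] then page_text else
  let lines0 : List (List Char) := pvSplitKeep page_text.toList []
  let liOf : Int → Int := fun rel =>
    if rel ≤ 0 then 0
    else (lines0.foldl (fun (st : Int × Int) ln =>
            ((if st.2 ≤ rel then st.1 + 1 else st.1), st.2 + (ln.length : Int))) (0, 0)).1 - 1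
  let pairs := (PySem.List.sorted injections (fun x => x.1) true).map (fun p => (liOf p.1, p.2.toList))
  let outLines := lines0.zipIdx.map (fun q =>
    pairs.foldl (fun cur p => if p.1 = (q.2 : Int) then pvApplySuffix cur p.2 else cur) q.1)
  String.ofList (PySem.Chars.join [] outLines)

-- ===== PRECONDITION & SPEC =====
-- Pre_ excludes only the inputs on which A raises IndexError: empty page_text with a
-- non-empty injections list (lines is [] and lines[0] is read).
def Pre_annotate_page_text (page_text : String) (injections : List (Int × String)) : Prop :=
  injections = [] ∨ page_text ≠ ""
instance (page_text : String) (injections : List (Int × String)) : Decidable (Pre_annotate_page_text page_text injections) := by unfold Pre_annotate_page_text; infer_instance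

def pvWitness_annotate_page_text : String × (List (Int × String)) := ("a\nbc\n", [(4, "x"), (0, "y")])

-- On empty page_text with non-empty injections A raises IndexError; B returns page_text ("").
def Raises_annotate_page_text (page_text : String) (injections : List (Int × String)) : Prop :=
  page_text = "" ∧ injections ≠ []
instance (page_text : String) (injections : List (Int × String)) : Decidable (Raises_annotate_page_text page_text injections) := by unfold Raises_annotate_page_text; infer_instance
def pvRaiseWitness_annotate_page_text : String × (List (Int × String)) := ("", [(0, "x")])
def pvRaiseWitnessOut_annotate_page_text : String := ""

def Spec_annotate_page_text (page_text : String) (injections : List (Int × String)) (out : String) : Prop := out = annotate_page_text_alt page_text injections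
instance (page_text : String) (injections : List (Int × String)) (out : String) : Decidable (Spec_annotate_page_text page_text injections out) := by unfold Spec_annotate_page_text; infer_instance

-- ===== CLAIM (what is proved, stated in full; the proofs are below) =====
def Claim_equal_annotate_page_text : Prop := ∀ (page_text : String) (injections : List (Int × String)), Dom_annotate_page_text page_text injections → Pre_annotate_page_text page_text injections → Spec_annotate_page_text page_text injections (annotate_page_text page_text injections)
def Claim_raises_annotate_page_text : Prop := (∀ (page_text : String) (injections : List (Int × String)), Dom_annotate_page_text page_text injections → Raises_annotate_page_text page_text injections → ¬ Pre_annotate_page_text page_text injections) ∧ (Dom_annotate_page_text (pvRaiseWitness_annotate_page_text.1) (pvRaiseWitness_annotate_page_text.2) ∧ Raises_annotate_page_text (pvRaiseWitness_annotate_page_text.1) (pvRaiseWitness_annotate_page_text.2) ∧ annotate_page_text_alt (pvRaiseWitness_annotate_page_text.1) (pvRaiseWitness_annotate_page_text.2) = pvRaiseWitnessOut_annotate_page_text)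


-- ===== LEMMAS AND PROOFS =====

-- proof-side: the list of line-start offsets, and the common line index as a Nat
def pfStarts : List (List Char) → Int → List Int
  | [], _ => []
  | ln :: rest, a => a :: pfStarts rest (a + (ln.length : Int))

def pfIdx (lines : List (List Char)) (rel : Int) : Nat :=
  if rel ≤ 0 then 0 else ((pfStarts lines 0).countP (fun s => decide (s ≤ rel))) - 1

theorem length_pfStarts (lines : List (List Char)) (a : Int) :
    (pfStarts lines a).length = lines.length := by
  induction lines generalizing a with
  | nil => rfl
  | cons ln rest ih => simp [pfStarts, ih]

theorem pfStarts_ge (lines : List (List Char)) (a : Int) :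
    ∀ x ∈ pfStarts lines a, a ≤ x := by
  induction lines generalizing a with
  | nil => simp [pfStarts]
  | cons ln rest ih =>
    intro x hx
    simp only [pfStarts, List.mem_cons] at hx
    rcases hx with rfl | hx
    · exact le_refl _
    · have := ih (a + (ln.length : Int)) x hx; omega

theorem pfStarts_pairwise (lines : List (List Char)) (a : Int) :
    (pfStarts lines a).Pairwise (· ≤ ·) := by
  induction lines generalizing a with
  | nil => simp [pfStarts]
  | cons ln rest ih =>
    refine List.Pairwise.cons ?_ (ih _)
    intro x hx
    have := pfStarts_ge rest (a + (ln.length : Int)) x hx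
    omega

theorem pfStarts_mono (lines : List (List Char)) (a : Int) (i j : Nat)
    (hi : i < (pfStarts lines a).length) (hj : j < (pfStarts lines a).length) (hij : i ≤ j) :
    (pfStarts lines a)[i] ≤ (pfStarts lines a)[j] := by
  rcases Nat.lt_or_ge i j with h | h
  · exact (List.pairwise_iff_getElem.mp (pfStarts_pairwise lines a)) i j hi hj h
  · have : i = j := by omega
    subst this; exact le_refl _

-- A's starts-building fold produces pfStarts
theorem startsA_eq (lines : List (List Char)) : ∀ (init : List Int) (a : Int),
    (lines.foldl (fun (st : List Int × Int) ln => (st.1 ++ [st.2], st.2 + (ln.length : Int))) (init, a)).1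
      = init ++ pfStarts lines a := by
  induction lines with
  | nil => intro init a; simp [pfStarts]
  | cons ln rest ih =>
    intro init a
    simp only [List.foldl_cons, pfStarts]
    rw [ih (init ++ [a]) (a + (ln.length : Int))]
    simp

-- B's counting fold counts the pfStarts entries ≤ rel
theorem countB_eq (rel : Int) (lines : List (List Char)) : ∀ (c a : Int),
    (lines.foldl (fun (st : Int × Int) ln =>
        ((if st.2 ≤ rel then st.1 + 1 else st.1), st.2 + (ln.length : Int))) (c, a)).1
      = c + (((pfStarts lines a).countP (fun s => decide (s ≤ rel)) : Nat) : Int) := by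
  induction lines with
  | nil => intro c a; simp [pfStarts]
  | cons ln rest ih =>
    intro c a
    simp only [List.foldl_cons, pfStarts, List.countP_cons]
    rw [ih]
    by_cases h : a ≤ rel <;> simp [h] <;> push_cast <;> ring

-- the binary-search loop: invariant-based characterisation
theorem bsLoop_spec (S : List Int) (rel : Int)
    (hmono : ∀ (i j : Nat) (hi : i < S.length) (hj : j < S.length), i ≤ j → S[i] ≤ S[j]) :
    ∀ (lo hi : Int), 0 ≤ lo → hi ≤ (S.length : Int) - 1 → lo ≤ hi + 1 →
    (∀ (i : Nat), (i : Int) < lo → ∀ (h : i < S.length), S[i] ≤ rel) →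
    (∀ (i : Nat), hi < (i : Int) → ∀ (h : i < S.length), rel < S[i]) →
    0 ≤ pvBsLoop S rel lo hi ∧ pvBsLoop S rel lo hi ≤ (S.length : Int) ∧
    (∀ (i : Nat), (i : Int) < pvBsLoop S rel lo hi → ∀ (h : i < S.length), S[i] ≤ rel) ∧
    (∀ (i : Nat), pvBsLoop S rel lo hi ≤ (i : Int) → ∀ (h : i < S.length), rel < S[i]) := by
  intro lo hi
  induction lo, hi using pvBsLoop.induct S rel with
  | case1 lo hi hle mid hm ih =>
    intro hlo hhi hlohi hbelow habove
    have hmid : lo ≤ mid ∧ mid ≤ hi := PySem.Int.floordiv_two_mid_bounds hle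
    have hmidlt : mid.toNat < S.length := by omega
    have hmideq : mid = ((mid.toNat : Nat) : Int) := by omega
    rw [hmideq, PySem.List.pyGet?_natCast, List.getElem?_eq_getElem hmidlt] at hm
    simp only [Option.getD_some] at hm
    rw [pvBsLoop]
    rw [dif_pos hle]
    simp only []
    rw [if_pos (by
      show (PySem.List.pyGet? S mid).getD 0 ≤ rel
      rw [hmideq, PySem.List.pyGet?_natCast, List.getElem?_eq_getElem hmidlt]
      simpa using hm)]
    refine ih (by omega) hhi (by omega) ?_ habove
    intro i hilt h
    have hile : i ≤ mid.toNat := by omega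
    exact le_trans (hmono i mid.toNat h hmidlt hile) hm
  | case2 lo hi hle mid hm ih =>
    intro hlo hhi hlohi hbelow habove
    have hmid : lo ≤ mid ∧ mid ≤ hi := PySem.Int.floordiv_two_mid_bounds hle
    have hmidlt : mid.toNat < S.length := by omega
    have hmideq : mid = ((mid.toNat : Nat) : Int) := by omega
    rw [hmideq, PySem.List.pyGet?_natCast, List.getElem?_eq_getElem hmidlt] at hm
    simp only [Option.getD_some] at hm
    rw [not_le] at hm
    rw [pvBsLoop]
    rw [dif_pos hle]
    simp only []
    rw [if_neg (by
      show ¬ (PySem.List.pyGet? S mid).getD 0 ≤ rel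
      rw [hmideq, PySem.List.pyGet?_natCast, List.getElem?_eq_getElem hmidlt]
      simpa using hm)]
    refine ih hlo (by omega) (by omega) hbelow ?_
    intro i higt h
    have hile : mid.toNat ≤ i := by omega
    exact lt_of_lt_of_le hm (hmono mid.toNat i hmidlt h hile)
  | case3 lo hi hle =>
    intro hlo hhi hlohi hbelow habove
    rw [pvBsLoop]
    simp only [dif_neg hle]
    refine ⟨hlo, by omega, hbelow, ?_⟩
    intro i hi h
    exact habove i (by omega) h

theorem countP_eq_of_iff (p : Int → Bool) : ∀ (S : List Int) (k : Nat), k ≤ S.length →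
    (∀ (i : Nat) (h : i < S.length), (p S[i] = true ↔ i < k)) → S.countP p = k := by
  intro S
  induction S with
  | nil =>
    intro k hk _
    have : k = 0 := by simpa using hk
    subst this; rfl
  | cons x t ih =>
    intro k hk hiff
    rcases k with _ | k'
    · have hx : p x = false := by
        have := hiff 0 (by simp)
        simpa using this
      have ht : t.countP p = 0 := by
        refine ih 0 (by omega) ?_
        intro i h
        have := hiff (i + 1) (by simpa using Nat.succ_lt_succ h)
        simpa using this
      simp [hx, ht]
    · have hx : p x = true := by
        have := hiff 0 (by simp)
        simpa using this
      have ht : t.countP p = k' := by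
        refine ih k' (by simpa using hk) ?_
        intro i h
        have := hiff (i + 1) (by simpa using Nat.succ_lt_succ h)
        simpa [Nat.succ_lt_succ_iff] using this
      simp [hx, ht]

theorem pvSplitKeep_eq_nil_iff : ∀ (s acc : List Char), pvSplitKeep s acc = [] ↔ s = [] ∧ acc = [] := by
  intro s acc
  induction s, acc using pvSplitKeep.induct with
  | case1 => simp [pvSplitKeep]
  | case2 acc h => simp [pvSplitKeep, h]
  | case3 rest acc ih => simp [pvSplitKeep]
  | case4 rest acc ih => simp [pvSplitKeep]
  | case5 rest acc hne ih => rw [pvSplitKeep.eq_def]; simp_all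
  | case6 c rest acc h1 h2 h3 ih => rw [pvSplitKeep.eq_def]; simp_all

-- the two index computations agree, and the index is in range
theorem idx_eq (lines : List (List Char)) (hne : lines ≠ []) (rel : Int) :
    pvLineIndexAt (pfStarts lines 0) rel = ((pfIdx lines rel : Nat) : Int) ∧
    pfIdx lines rel < lines.length := by
  rcases lines with _ | ⟨ln0, rest⟩
  · exact absurd rfl hne
  set lines := ln0 :: rest with hlines
  have hlen0 : 0 < lines.length := by simp [hlines]
  have hS0 : (pfStarts lines 0)[0]'(by rw [length_pfStarts]; exact hlen0) = 0 := by
    simp [hlines, pfStarts]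
  by_cases hrel : rel ≤ 0
  · constructor
    · simp [pvLineIndexAt, pfIdx, hrel]
    · simp [pfIdx, hrel, hlen0]
  · have h1rel : 1 ≤ rel := by omega
    have hmono := pfStarts_mono lines 0
    have hlenS : (pfStarts lines 0).length = lines.length := length_pfStarts lines 0
    have hspec := bsLoop_spec (pfStarts lines 0) rel hmono 0 (((lines.length : Nat) : Int) - 1)
      (by omega) (by omega) (by omega)
      (by intro i hi h; omega)
      (by intro i hi h; rw [hlenS] at h; omega)
    set r := pvBsLoop (pfStarts lines 0) rel 0 (((lines.length : Nat) : Int) - 1) with hr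
    obtain ⟨hr0, hrlen, hrbelow, hrabove⟩ := hspec
    have hr1 : 1 ≤ r := by
      by_contra hcon
      have := hrabove 0 (by omega) (by omega)
      omega
    have hcount : (pfStarts lines 0).countP (fun s => decide (s ≤ rel)) = r.toNat := by
      refine countP_eq_of_iff _ _ r.toNat (by omega) ?_
      intro i h
      simp only [decide_eq_true_eq]
      constructor
      · intro hle
        by_contra hcon
        have := hrabove i (by omega) h
        omega
      · intro hlt
        exact hrbelow i (by omega) h
    constructor
    · rw [pvLineIndexAt, if_neg hrel, hlenS]
      show max 0 (r - 1) = _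
      rw [show pfIdx lines rel = (pfStarts lines 0).countP (fun s => decide (s ≤ rel)) - 1 by
        simp [pfIdx, hrel]]
      rw [hcount]
      omega
    · have hcle : (pfStarts lines 0).countP (fun s => decide (s ≤ rel)) ≤ lines.length := by
        calc _ ≤ (pfStarts lines 0).length := List.countP_le_length
        _ = lines.length := hlenS
      rw [show pfIdx lines rel = (pfStarts lines 0).countP (fun s => decide (s ≤ rel)) - 1 by
        simp [pfIdx, hrel]]
      rw [hcount]
      omega

-- the per-injection indexed update, abstracted
def pfStep {α β : Type} (idxF : β → Nat) (g : α → β → α) (ls : List α) (p : β) : List α :=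
  match ls[idxF p]? with
  | none => ls
  | some ln => ls.set (idxF p) (g ln p)

theorem length_foldl_pfStep {α β : Type} (idxF : β → Nat) (g : α → β → α) :
    ∀ (injs : List β) (ls : List α), (injs.foldl (pfStep idxF g) ls).length = ls.length := by
  intro injs
  induction injs with
  | nil => intro ls; rfl
  | cons p rest ih =>
    intro ls
    simp only [List.foldl_cons]
    rw [ih]
    unfold pfStep
    cases h : ls[idxF p]? with
    | none => rfl
    | some ln => simp

-- a left fold of indexed updates, read at one index, is the fold of just the updates aimed there
theorem foldl_pfStep_getElem? {α β : Type} (idxF : β → Nat) (g : α → β → α) :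
    ∀ (injs : List β) (ls : List α) (i : Nat), (∀ p ∈ injs, idxF p < ls.length) → (hi : i < ls.length) →
    (injs.foldl (pfStep idxF g) ls)[i]? =
      some (injs.foldl (fun cur p => if idxF p = i then g cur p else cur) ls[i]) := by
  intro injs
  induction injs with
  | nil =>
    intro ls i _ hi
    simp [List.getElem?_eq_getElem hi]
  | cons p rest ih =>
    intro ls i hidx hi
    have hp : idxF p < ls.length := hidx p (List.mem_cons_self)
    simp only [List.foldl_cons]
    have hstep : pfStep idxF g ls p = ls.set (idxF p) (g ls[idxF p] p) := by
      unfold pfStep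
      rw [List.getElem?_eq_getElem hp]
    rw [hstep]
    have hlen : i < (ls.set (idxF p) (g ls[idxF p] p)).length := by simpa using hi
    rw [ih _ i (by intro q hq; simpa using hidx q (List.mem_cons_of_mem _ hq)) hlen]
    by_cases hpi : idxF p = i
    · subst hpi
      simp [List.getElem_set_self]
    · simp [List.getElem_set_ne hpi, hpi]

theorem liOfB_eq (lines : List (List Char)) (hne : lines ≠ []) (rel : Int) :
    (if rel ≤ 0 then (0 : Int)
     else (lines.foldl (fun (st : Int × Int) ln =>
            ((if st.2 ≤ rel then st.1 + 1 else st.1), st.2 + (ln.length : Int))) (0, 0)).1 - 1)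
      = ((pfIdx lines rel : Nat) : Int) := by
  by_cases hrel : rel ≤ 0
  · simp [pfIdx, hrel]
  · rw [if_neg hrel, countB_eq rel lines 0 0]
    have hpos : 0 < (pfStarts lines 0).countP (fun s => decide (s ≤ rel)) := by
      rcases lines with _ | ⟨ln0, rest⟩
      · exact absurd rfl hne
      refine List.countP_pos_iff.mpr ⟨0, ?_, by simpa using (by omega : (0 : Int) ≤ rel)⟩
      simp [pfStarts]
    simp only [pfIdx, if_neg hrel]
    omega

theorem main_eq (pt : String) (injs : List (Int × String)) (hinj : injs ≠ []) (hpt : pt ≠ "") :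
    annotate_page_text pt injs = annotate_page_text_alt pt injs := by
  have hne : pvSplitKeep pt.toList [] ≠ [] := by
    intro hc
    rw [pvSplitKeep_eq_nil_iff] at hc
    exact hpt (String.toList_eq_nil_iff.mp hc.1)
  set lines0 := pvSplitKeep pt.toList [] with hlines0
  simp only [annotate_page_text, annotate_page_text_alt, if_neg hinj, ← hlines0]
  apply congrArg
  apply congrArg
  have hstarts : (lines0.foldl (fun (st : List Int × Int) ln =>
      (st.1 ++ [st.2], st.2 + (ln.length : Int))) ([], 0)).1 = pfStarts lines0 0 := by
    simpa using startsA_eq lines0 [] 0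
  rw [hstarts]
  have hfunA : (fun (ls : List (List Char)) (p : Int × String) =>
      match PySem.List.pyGet? ls (pvLineIndexAt (pfStarts lines0 0) p.1) with
      | none => ls
      | some ln => ls.set (pvLineIndexAt (pfStarts lines0 0) p.1).toNat (pvApplySuffix ln p.2.toList))
      = pfStep (fun p : Int × String => pfIdx lines0 p.1) (fun cur p => pvApplySuffix cur p.2.toList) := by
    funext ls p
    rw [(idx_eq lines0 hne p.1).1]
    simp only [pfStep, PySem.List.pyGet?_natCast, Int.toNat_natCast]
    cases ls[pfIdx lines0 p.1]? <;> rfl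
  rw [hfunA]
  have hfunB : (fun p : Int × String =>
      ((if p.1 ≤ 0 then (0 : Int)
        else (lines0.foldl (fun (st : Int × Int) ln =>
               ((if st.2 ≤ p.1 then st.1 + 1 else st.1), st.2 + (ln.length : Int))) (0, 0)).1 - 1),
       p.2.toList))
      = (fun p : Int × String => (((pfIdx lines0 p.1 : Nat) : Int), p.2.toList)) := by
    funext p
    rw [liOfB_eq lines0 hne p.1]
  rw [hfunB]
  refine List.ext_getElem? ?_
  intro i
  by_cases hi : i < lines0.length
  · rw [foldl_pfStep_getElem? (fun p : Int × String => pfIdx lines0 p.1) (fun cur p => pvApplySuffix cur p.2.toList) _ _ i (fun p _ => (idx_eq lines0 hne p.1).2) hi]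
    have hiz : i < lines0.zipIdx.length := by simpa [List.length_zipIdx] using hi
    rw [List.getElem?_map, List.getElem?_eq_getElem hiz]
    simp only [Option.map_some, List.getElem_zipIdx, List.foldl_map, Nat.cast_inj, Nat.zero_add]
  · have hlenA : ((PySem.List.sorted injs (fun x => x.1) true).foldl
        (pfStep (fun p : Int × String => pfIdx lines0 p.1) (fun cur p => pvApplySuffix cur p.2.toList)) lines0).length
        = lines0.length := length_foldl_pfStep _ _ _ _
    rw [List.getElem?_eq_none (by rw [hlenA]; omega),
        List.getElem?_eq_none (by simp only [List.length_map, List.length_zipIdx]; omega)]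

-- ===== VERDICT (by name: the statement is the Claim_ definition above) =====
theorem annotate_page_text_spec : Claim_equal_annotate_page_text := by
  intro pt injs hdom hpre
  unfold Spec_annotate_page_text
  by_cases hinj : injs = []
  · simp [annotate_page_text, annotate_page_text_alt, hinj]
  · have hpt : pt ≠ "" := by
      rcases hpre with h | h
      · exact absurd h hinj
      · exact h
    exact main_eq pt injs hinj hpt

theorem annotate_page_text_raises : Claim_raises_annotate_page_text := by
  unfold Claim_raises_annotate_page_text
  exact ⟨by intro p i _ hr hp; rcases hr with ⟨h1, h2⟩; rcases hp with h | h <;> simp_all, by decide⟩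

-- self-check: the raise witness really lies inside Raises_ (read off the theorem above)
theorem pvRaiseWitness_ok :
    Raises_annotate_page_text pvRaiseWitness_annotate_page_text.1 pvRaiseWitness_annotate_page_text.2 :=
  annotate_page_text_raises.2.2.1
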